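-- pv_equiv track=rewrite | github.com/GeorginRMZ/gms | src/Python/gms.py | gms
-- ===== SOURCE A (Python) =====
-- def gms(string: str) -> str:
--     result: int = 0
--     iterator: int = 0
--     match len(string):
--         case 1:
--             return hex(ord(string[iterator]) + (ord(string[iterator]) ^ ord(string[0])))[2:]
--         case 2:
--             for _ in zip(string):
--                 result += (ord(string[iterator]) + (ord(string[iterator]) ^ ord(string[0]))) * \
--                           (ord(string[iterator]) + (ord(string[iterator]) ^ ord(string[1])))
--                 iterator += 1
--             return hex(result)[2:]
--         case 3:
--             for _ in zip(string):
--                 result += (ord(string[iterator]) + (ord(string[iterator]) ^ ord(string[0]))) * \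
--                           (ord(string[iterator]) + (ord(string[iterator]) ^ ord(string[1]))) * \
--                           (ord(string[iterator]) + (ord(string[iterator]) ^ ord(string[2])))
--                 iterator += 1
--             return hex(result)[2:]
--         case 4:
--             for _ in zip(string):
--                 result += (ord(string[iterator]) + (ord(string[iterator]) ^ ord(string[0]))) * \
--                           (ord(string[iterator]) + (ord(string[iterator]) ^ ord(string[1]))) * \
--                           (ord(string[iterator]) + (ord(string[iterator]) ^ ord(string[2]))) * \
--                           (ord(string[iterator]) + (ord(string[iterator]) ^ ord(string[3])))
--                 iterator += 1
--             return hex(result)[2:]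
--         case 5:
--             for _ in zip(string):
--                 result += (ord(string[iterator]) + (ord(string[iterator]) ^ ord(string[0]))) * \
--                           (ord(string[iterator]) + (ord(string[iterator]) ^ ord(string[1]))) * \
--                           (ord(string[iterator]) + (ord(string[iterator]) ^ ord(string[2]))) * \
--                           (ord(string[iterator]) + (ord(string[iterator]) ^ ord(string[3]))) * \
--                           (ord(string[iterator]) + (ord(string[iterator]) ^ ord(string[4])))
--                 iterator += 1
--             return hex(result)[2:]
--         case _:
--             for _ in zip(string):
--                 if iterator >= len(string) - 5:
--                     result += (ord(string[iterator]) + (ord(string[iterator]) ^ ord(string[0]))) * \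
--                               (ord(string[iterator]) + (ord(string[iterator]) ^ ord(string[1]))) * \
--                               (ord(string[iterator]) + (ord(string[iterator]) ^ ord(string[2]))) * \
--                               (ord(string[iterator]) + (ord(string[iterator]) ^ ord(string[3]))) * \
--                               (ord(string[iterator]) + (ord(string[iterator]) ^ ord(string[4])))
--                 else:
--                     result += (ord(string[iterator]) + (ord(string[iterator]) ^ ord(string[iterator + 1]))) * \
--                               (ord(string[iterator]) + (ord(string[iterator]) ^ ord(string[iterator + 2]))) * \
--                               (ord(string[iterator]) + (ord(string[iterator]) ^ ord(string[iterator + 3]))) * \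
--                               (ord(string[iterator]) + (ord(string[iterator]) ^ ord(string[iterator + 4]))) * \
--                               (ord(string[iterator]) + (ord(string[iterator]) ^ ord(string[iterator + 5])))
--                 iterator += 1
--             return hex(result)[2:]
-- ===== SOURCE B (Python) =====
-- def gms(string: str) -> str:
--     ords = [ord(c) for c in string]
--     n = len(ords)
--     result = 0
--     for i in range(n):
--         if n <= 5:
--             idxs = range(n)
--         elif i >= n - 5:
--             idxs = range(5)
--         else:
--             idxs = range(i + 1, i + 6)
--         p = 1
--         for j in idxs:
--             p *= ords[i] + (ords[i] ^ ords[j])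
--         result += p
--     return hex(result)[2:]
-- ===== Notes on version B (the rewrite author's own statement) =====
-- stated objective: simpler
-- what changed: Replaces the 6-branch match with unrolled products by a single position-driven double loop: for each position i a neighbour index list is chosen (all indices when len<=5, the first five for the last five positions, i+1..i+5 otherwise) and the product is accumulated in an inner loop.
import Mathlib
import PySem

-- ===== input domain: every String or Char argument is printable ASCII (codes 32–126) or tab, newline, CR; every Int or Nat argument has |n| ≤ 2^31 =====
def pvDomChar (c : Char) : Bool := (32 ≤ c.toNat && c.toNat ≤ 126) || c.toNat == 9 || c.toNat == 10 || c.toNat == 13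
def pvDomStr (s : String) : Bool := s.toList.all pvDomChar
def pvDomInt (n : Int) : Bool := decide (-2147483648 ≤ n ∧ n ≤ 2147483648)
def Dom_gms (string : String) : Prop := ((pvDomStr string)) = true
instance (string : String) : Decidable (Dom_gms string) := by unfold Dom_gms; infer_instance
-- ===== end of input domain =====

-- B replaces A's 6-branch match with unrolled products by one position-driven double loop; objective: simpler.

-- hex(n)[2:] for n ≥ 0 (lowercase digits, "0" for 0); shared by both ports since both Pythons call hex
def pvHexAux : Nat → Nat → List Char
  | 0, _ => []
  | fuel + 1, n => if n = 0 then [] else pvHexAux fuel (n / 16) ++ [Nat.digitChar (n % 16)]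

def pvHex (n : Nat) : String := if n = 0 then "0" else String.ofList (pvHexAux (n + 1) n)

-- ===== PORT A =====
-- ord(string[j]) in A's factors (index always in range in A)
def pvOrdA (cs : List Char) (j : Nat) : Nat := (cs.getD j ' ').toNat

-- one factor  ord(string[i]) + (ord(string[i]) ^ ord(string[j]))
def pvT (cs : List Char) (i j : Nat) : Nat := pvOrdA cs i + (pvOrdA cs i ^^^ pvOrdA cs j)

def gms (string : String) : String :=
  let cs := string.toList
  match cs.length with
  | 1 => pvHex (pvT cs 0 0)
  | 2 => pvHex ((List.range cs.length).foldl
      (fun r i => r + pvT cs i 0 * pvT cs i 1) 0)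
  | 3 => pvHex ((List.range cs.length).foldl
      (fun r i => r + pvT cs i 0 * pvT cs i 1 * pvT cs i 2) 0)
  | 4 => pvHex ((List.range cs.length).foldl
      (fun r i => r + pvT cs i 0 * pvT cs i 1 * pvT cs i 2 * pvT cs i 3) 0)
  | 5 => pvHex ((List.range cs.length).foldl
      (fun r i => r + pvT cs i 0 * pvT cs i 1 * pvT cs i 2 * pvT cs i 3 * pvT cs i 4) 0)
  | _ => pvHex ((List.range cs.length).foldl
      (fun r i => r + (if cs.length - 5 ≤ i then
          pvT cs i 0 * pvT cs i 1 * pvT cs i 2 * pvT cs i 3 * pvT cs i 4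
        else
          pvT cs i (i+1) * pvT cs i (i+2) * pvT cs i (i+3) * pvT cs i (i+4) * pvT cs i (i+5))) 0)

-- ===== PORT B =====
def gms_alt (string : String) : String :=
  let ords := string.toList.map Char.toNat
  let n := ords.length
  let result := (List.range n).foldl (fun r i =>
    let idxs := if n ≤ 5 then List.range n
                else if n - 5 ≤ i then List.range 5
                else List.range' (i + 1) 5
    r + idxs.foldl (fun p j => p * (ords.getD i 0 + (ords.getD i 0 ^^^ ords.getD j 0))) 1) 0
  pvHex result

-- ===== PRECONDITION & SPEC =====
def Spec_gms (string : String) (out : String) : Prop := out = gms_alt string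
instance (string : String) (out : String) : Decidable (Spec_gms string out) := by unfold Spec_gms; infer_instance

-- ===== CLAIM (what is proved, stated in full; the proofs are below) =====
def Claim_equal_gms : Prop := ∀ (string : String), Dom_gms string → Spec_gms string (gms string)

-- ===== LEMMAS AND PROOFS =====

-- B's list lookup coincides with A's on in-range indices
theorem pvOrd_map (cs : List Char) (j : Nat) (h : j < cs.length) :
    (cs.map Char.toNat).getD j 0 = pvOrdA cs j := by
  have h' : j < (cs.map Char.toNat).length := by simpa using h
  rw [List.getD_eq_getElem _ _ h', pvOrdA, List.getD_eq_getElem _ _ h]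
  simp

-- B's factor coincides with A's on in-range indices
theorem pvF_eq (cs : List Char) (i j : Nat) (hi : i < cs.length) (hj : j < cs.length) :
    (cs.map Char.toNat).getD i 0 + ((cs.map Char.toNat).getD i 0 ^^^ (cs.map Char.toNat).getD j 0)
      = pvT cs i j := by
  rw [pvOrd_map cs i hi, pvOrd_map cs j hj, pvT]

theorem gms_eq_alt (string : String) : gms_alt string = gms string := by
  unfold gms gms_alt
  set cs := string.toList with hcs
  have hlen : (cs.map Char.toNat).length = cs.length := by simp
  rcases h6 : cs.length with _ | _ | _ | _ | _ | _ | m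
  · simp only [hlen, h6, List.range_zero, List.foldl_nil]
  · -- length 1
    have h0 : (0:Nat) < cs.length := by omega
    simp only [hlen, h6]
    show pvHex _ = pvHex (pvT cs 0 0)
    rw [show List.range 1 = [0] from rfl]
    simp only [List.foldl, if_pos (show (1:Nat) ≤ 5 by norm_num)]
    rw [pvF_eq cs 0 0 h0 h0]
    ring_nf
  · -- length 2
    simp only [hlen, h6]
    show pvHex _ = pvHex _
    congr 1
    apply PySem.List.foldl_congr_mem
    intro r i hi
    have hi2 : i < cs.length := by simp at hi; omega
    simp only [if_pos (show (2:Nat) ≤ 5 by norm_num)]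
    rw [show List.range 2 = [0, 1] from rfl]
    simp only [List.foldl]
    rw [pvF_eq cs i 0 hi2 (by omega), pvF_eq cs i 1 hi2 (by omega)]
    ring
  · simp only [hlen, h6]
    show pvHex _ = pvHex _
    congr 1
    apply PySem.List.foldl_congr_mem
    intro r i hi
    have hi2 : i < cs.length := by simp at hi; omega
    simp only [if_pos (show (3:Nat) ≤ 5 by norm_num)]
    rw [show List.range 3 = [0, 1, 2] from rfl]
    simp only [List.foldl]
    rw [pvF_eq cs i 0 hi2 (by omega), pvF_eq cs i 1 hi2 (by omega),
        pvF_eq cs i 2 hi2 (by omega)]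
    ring
  · simp only [hlen, h6]
    show pvHex _ = pvHex _
    congr 1
    apply PySem.List.foldl_congr_mem
    intro r i hi
    have hi2 : i < cs.length := by simp at hi; omega
    simp only [if_pos (show (4:Nat) ≤ 5 by norm_num)]
    rw [show List.range 4 = [0, 1, 2, 3] from rfl]
    simp only [List.foldl]
    rw [pvF_eq cs i 0 hi2 (by omega), pvF_eq cs i 1 hi2 (by omega),
        pvF_eq cs i 2 hi2 (by omega), pvF_eq cs i 3 hi2 (by omega)]
    ring
  · simp only [hlen, h6]
    show pvHex _ = pvHex _
    congr 1
    apply PySem.List.foldl_congr_mem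
    intro r i hi
    have hi2 : i < cs.length := by simp at hi; omega
    simp only [if_pos (show (5:Nat) ≤ 5 by norm_num)]
    rw [show List.range 5 = [0, 1, 2, 3, 4] from rfl]
    simp only [List.foldl]
    rw [pvF_eq cs i 0 hi2 (by omega), pvF_eq cs i 1 hi2 (by omega),
        pvF_eq cs i 2 hi2 (by omega), pvF_eq cs i 3 hi2 (by omega),
        pvF_eq cs i 4 hi2 (by omega)]
    ring
  · -- length = m + 6
    simp only [hlen, h6]
    show pvHex _ = pvHex _
    congr 1
    apply PySem.List.foldl_congr_mem
    intro r i hi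
    have hi2 : i < cs.length := by simp at hi; omega
    simp only [if_neg (show ¬ (m + 6 ≤ 5) by omega)]
    by_cases hlast : m + 6 - 5 ≤ i
    · rw [if_pos hlast, if_pos (show m + 1 + 1 + 1 + 1 + 1 + 1 - 5 ≤ i by omega),
          show List.range 5 = [0, 1, 2, 3, 4] from rfl]
      simp only [List.foldl]
      rw [pvF_eq cs i 0 hi2 (by omega), pvF_eq cs i 1 hi2 (by omega),
          pvF_eq cs i 2 hi2 (by omega), pvF_eq cs i 3 hi2 (by omega),
          pvF_eq cs i 4 hi2 (by omega)]
      ring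
    · rw [if_neg hlast, if_neg (show ¬ (m + 1 + 1 + 1 + 1 + 1 + 1 - 5 ≤ i) by omega),
          show List.range' (i + 1) 5 = [i+1, i+2, i+3, i+4, i+5] by
            simp [List.range']
          ]
      simp only [List.foldl]
      rw [pvF_eq cs i (i+1) hi2 (by omega), pvF_eq cs i (i+2) hi2 (by omega),
          pvF_eq cs i (i+3) hi2 (by omega), pvF_eq cs i (i+4) hi2 (by omega),
          pvF_eq cs i (i+5) hi2 (by omega)]
      ring

-- ===== VERDICT (by name: the statement is the Claim_ definition above) =====
theorem gms_spec : Claim_equal_gms := by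
  intro s _
  unfold Spec_gms
  exact (gms_eq_alt s).symm
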